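-- pv_equiv track=rewrite | github.com/bf6/bioinformatics | course1/week1/custom.py | get_clumps
-- ===== SOURCE A (Python) =====
-- from collections import defaultdict
--
-- def get_clumps(genome: str, k: int, L: int, t: int):
--     """
--     Given `genome`, find all `k`-mers that appear at least `t`
--     times in a window `L` nucleotides long.
--     """
--     kmers = defaultdict(list)
--     clumps = []
--     for x in range(0, len(genome) - k + 1):
--         pattern = genome[x:x+k]
--         kmers[pattern].append(x)
--         while kmers[pattern][-1] + k - kmers[pattern][0] > L:
--             kmers[pattern].pop(0)
--         if len(kmers[pattern]) >= t:
--             clumps.append(pattern) if pattern not in clumps else None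
--     return clumps
-- ===== SOURCE B (Python) =====
-- def get_clumps(genome: str, k: int, L: int, t: int):
--     """
--     Given `genome`, find all `k`-mers that appear at least `t`
--     times in a window `L` nucleotides long.
--     """
--     positions = {}
--     seen = set()
--     clumps = []
--     for x in range(len(genome) - k + 1):
--         p = genome[x:x+k]
--         ps = positions.setdefault(p, [])
--         ps.append(x)
--         if (t <= 0 or (len(ps) >= t and ps[len(ps) - t] + L >= x + k)) and p not in seen:
--             seen.add(p)
--             clumps.append(p)
--     return clumps
-- ===== Notes on version B (the rewrite author's own statement) =====
-- stated objective: alternative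
-- what changed: A maintains a per-k-mer sliding window by repeatedly popping the front of a list and tests clump membership by scanning the clumps list; B keeps the full append-only occurrence list per k-mer and replaces the eviction loop by a single arithmetic test on the t-th most recent occurrence (ps[len(ps)-t] + L >= x + k), with a set for membership.
import Mathlib
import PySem

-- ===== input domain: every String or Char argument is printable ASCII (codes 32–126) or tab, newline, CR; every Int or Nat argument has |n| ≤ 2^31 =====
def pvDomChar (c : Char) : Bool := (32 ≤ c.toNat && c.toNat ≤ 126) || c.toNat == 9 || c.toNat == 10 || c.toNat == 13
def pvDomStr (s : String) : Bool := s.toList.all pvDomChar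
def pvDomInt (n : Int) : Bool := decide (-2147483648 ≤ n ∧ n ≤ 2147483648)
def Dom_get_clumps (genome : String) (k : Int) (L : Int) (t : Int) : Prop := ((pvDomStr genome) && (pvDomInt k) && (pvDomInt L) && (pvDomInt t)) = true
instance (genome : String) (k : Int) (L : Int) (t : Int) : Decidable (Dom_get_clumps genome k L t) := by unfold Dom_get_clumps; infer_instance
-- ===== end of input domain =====

-- B replaces A's per-k-mer eviction loop (repeated list.pop(0)) by a direct arithmetic test on the
-- t-th most recent occurrence, with a set for the clumps-membership test: same return value by a
-- different mechanism. Equivalence is of return values (neither version mutates its arguments).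

-- ===== PORT A =====
-- the 'while kmers[pattern][-1] + k - kmers[pattern][0] > L: kmers[pattern].pop(0)' loop;
-- the [] case is unreachable under Pre_ (Python raises IndexError there)
def popA (k L : Int) : List Int → List Int
  | [] => []
  | a :: rest =>
      if PySem.List.pyGetD (a :: rest) (-1) 0 + k - PySem.List.pyGetD (a :: rest) 0 0 > L
      then popA k L rest
      else a :: rest

-- the body of A's 'for x in range(0, len(genome) - k + 1)' loop
def stepA (genome : String) (k L t : Int)
    (st : PySem.Dict String (List Int) × List String) (x : Int) :
    PySem.Dict String (List Int) × List String :=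
  let pattern := PySem.Str.slice genome (some x) (some (x + k))
  let lst := popA k L (st.1.getD pattern [] ++ [x])
  let kmers := st.1.insert pattern lst
  let clumps := if (lst.length : Int) ≥ t then
      (if pattern ∈ st.2 then st.2 else st.2 ++ [pattern])
    else st.2
  (kmers, clumps)

def get_clumps (genome : String) (k : Int) (L : Int) (t : Int) : List String :=
  ((PySem.List.pyRange 0 (PySem.Str.len genome - k + 1) 1).foldl
    (stepA genome k L t) (PySem.Dict.empty, [])).2

-- ===== PORT B =====
-- the body of B's loop: append x to positions[p], then the threshold test on the
-- t-th most recent occurrence 'ps[len(ps) - t] + L >= x + k', with a seen-set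
def stepB (genome : String) (k L t : Int)
    (st : PySem.Dict String (List Int) × PySem.Set String × List String) (x : Int) :
    PySem.Dict String (List Int) × PySem.Set String × List String :=
  let p := PySem.Str.slice genome (some x) (some (x + k))
  let ps := st.1.getD p [] ++ [x]
  let positions := st.1.insert p ps
  if (t ≤ 0 ∨ ((ps.length : Int) ≥ t ∧ PySem.List.pyGetD ps ((ps.length : Int) - t) 0 + L ≥ x + k))
      ∧ PySem.Set.contains st.2.1 p = false
  then (positions, PySem.Set.add st.2.1 p, st.2.2 ++ [p])
  else (positions, st.2.1, st.2.2)

def get_clumps_alt (genome : String) (k : Int) (L : Int) (t : Int) : List String :=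
  ((PySem.List.pyRange 0 (PySem.Str.len genome - k + 1) 1).foldl
    (stepB genome k L t) (PySem.Dict.empty, PySem.Set.empty, [])).2.2

-- ===== PRECONDITION & SPEC =====
-- Pre_ excludes exactly the inputs where Python A raises IndexError: when k > L and the loop runs
-- at all (k ≤ len(genome)), A's while loop empties kmers[pattern] and then indexes the empty list.
def Pre_get_clumps (genome : String) (k : Int) (L : Int) (t : Int) : Prop :=
  k ≤ L ∨ PySem.Str.len genome < k
instance (genome : String) (k : Int) (L : Int) (t : Int) : Decidable (Pre_get_clumps genome k L t) := by unfold Pre_get_clumps; infer_instance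

def pvWitness_get_clumps : String × Int × Int × Int := ("GATCGATC", 4, 8, 2)

def Spec_get_clumps (genome : String) (k : Int) (L : Int) (t : Int) (out : List String) : Prop := out = get_clumps_alt genome k L t
instance (genome : String) (k : Int) (L : Int) (t : Int) (out : List String) : Decidable (Spec_get_clumps genome k L t out) := by unfold Spec_get_clumps; infer_instance

-- ===== CLAIM (what is proved, stated in full; the proofs are below) =====
def Claim_equal_get_clumps : Prop := ∀ (genome : String) (k : Int) (L : Int) (t : Int), Dom_get_clumps genome k L t → Pre_get_clumps genome k L t → Spec_get_clumps genome k L t (get_clumps genome k L t)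

-- ===== LEMMAS AND PROOFS =====

theorem pv_getD_eq {κ ν : Type} [BEq κ] (d : PySem.Dict κ ν) (k : κ) (d0 : ν) :
    d.getD k d0 = (d.get? k).getD d0 := by
  simp [PySem.Dict.getD, PySem.Dict.get?]

-- A's pop-loop, run right after appending x, drops exactly the prefix older than x + k - L
theorem popA_append (k L x : Int) (hkL : k ≤ L) : ∀ l : List Int,
    popA k L (l ++ [x]) = l.dropWhile (fun a => decide (x + k - a > L)) ++ [x]
  | [] => by
      have h1 : PySem.List.pyGetD [x] (-1) (0 : Int) = x := by
        simpa using PySem.List.pyGetD_neg_one_append_singleton ([] : List Int) x 0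
      simp only [List.nil_append, popA, h1, PySem.List.pyGetD_zero_cons, List.dropWhile_nil]
      rw [if_neg (by omega)]
  | a :: l' => by
      have hx : (a :: (l' ++ [x])) = (a :: l') ++ [x] := rfl
      simp only [List.cons_append, popA, List.dropWhile_cons]
      rw [hx, PySem.List.pyGetD_neg_one_append_singleton (a :: l') x 0]
      rw [show ((a :: l') ++ [x]) = a :: (l' ++ [x]) from rfl, PySem.List.pyGetD_zero_cons]
      by_cases h : x + k - a > L
      · rw [if_pos h, if_pos (by simpa using h)]
        exact popA_append k L x hkL l'
      · rw [if_neg h, if_neg (by simpa using h)]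
        rfl

theorem dropWhile_dropWhile_append {α : Type} (p1 p2 : α → Bool) (r : List α)
    (h : ∀ a, p1 a = true → p2 a = true) :
    ∀ l : List α, List.dropWhile p2 (List.dropWhile p1 l ++ r) = List.dropWhile p2 (l ++ r)
  | [] => rfl
  | a :: l' => by
      cases hp : p1 a with
      | true =>
          rw [List.dropWhile_cons_of_pos hp, dropWhile_dropWhile_append p1 p2 r h l',
            List.cons_append, List.dropWhile_cons_of_pos (h a hp)]
      | false =>
          rw [List.dropWhile_cons_of_neg (by simp [hp])]

-- re-pruning after the next occurrence absorbs the earlier pruning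
theorem popA_popA (k L x : Int) (hkL : k ≤ L) (l : List Int) (hle : ∀ a ∈ l, a ≤ x) :
    popA k L (popA k L l ++ [x]) = popA k L (l ++ [x]) := by
  induction l using List.reverseRecOn with
  | nil => simp [popA]
  | append_singleton l' x' _ =>
      rw [popA_append k L x' hkL l', popA_append k L x hkL, popA_append k L x hkL (l' ++ [x'])]
      have hx' : x' ≤ x := hle x' (by simp)
      rw [dropWhile_dropWhile_append _ _ _ (fun a ha => by
        simp only [decide_eq_true_eq] at ha ⊢; omega)]

-- for a sorted list, surviving dropWhile of a downward-closed predicate in ≥ s elements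
-- is decided by the s-th element from the end
theorem dropWhile_len_ge {p : Int → Bool} (hp : ∀ a b : Int, a ≤ b → p b = true → p a = true) :
    ∀ (l : List Int), l.Pairwise (· ≤ ·) → ∀ s : Nat, 1 ≤ s → s ≤ l.length →
      (s ≤ (List.dropWhile p l).length ↔ p (l.getD (l.length - s) 0) = false)
  | [], _, s, hs1, hs => by simp only [List.length_nil] at hs; omega
  | a :: l', hsort, s, hs1, hs => by
      cases hpa : p a with
      | true =>
          rw [List.dropWhile_cons_of_pos hpa]
          by_cases hsr : s ≤ l'.length
          · rw [dropWhile_len_ge hp l' (List.pairwise_cons.mp hsort).2 s hs1 hsr]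
            have hidx : (a :: l').length - s = (l'.length - s) + 1 := by
              simp only [List.length_cons]; omega
            rw [hidx, List.getD_cons_succ]
          · have hlen : (a :: l').length - s = 0 := by
              simp only [List.length_cons] at hs ⊢; omega
            rw [hlen, List.getD_cons_zero, hpa]
            have := List.length_dropWhile_le p l'
            constructor
            · intro hcon; omega
            · intro hcon; simp at hcon
      | false =>
          rw [List.dropWhile_cons_of_neg (by simp [hpa])]
          refine iff_of_true hs ?_
          rcases Nat.eq_zero_or_pos ((a :: l').length - s) with h0 | h0
          · rw [h0, List.getD_cons_zero]; exact hpa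
          · have hidx : (a :: l').length - s = ((a :: l').length - s - 1) + 1 := by omega
            rw [hidx, List.getD_cons_succ]
            have hjlt : (a :: l').length - s - 1 < l'.length := by
              simp only [List.length_cons] at hs h0 ⊢; omega
            rw [List.getD_eq_getElem _ _ hjlt]
            cases hres : p (l'[(a :: l').length - s - 1]'hjlt) with
            | false => rfl
            | true =>
                have hle : a ≤ l'[(a :: l').length - s - 1]'hjlt :=
                  (List.pairwise_cons.mp hsort).1 _ (List.getElem_mem _)
                exact absurd (hp a _ hle hres) (by simp [hpa])

-- A's threshold test on the pruned list equals B's O(1) test on the full list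
theorem cond_iff (k L t x : Int) (hkL : k ≤ L) (l : List Int)
    (hsort : l.Pairwise (· < ·)) (hlt : ∀ a ∈ l, a < x) :
    (t ≤ ((popA k L (l ++ [x])).length : Int)) ↔
      (t ≤ 0 ∨ ((t ≤ ((l ++ [x]).length : Int)) ∧
        PySem.List.pyGetD (l ++ [x]) (((l ++ [x]).length : Int) - t) 0 + L ≥ x + k)) := by
  rw [popA_append k L x hkL l]
  set p : Int → Bool := fun a => decide (x + k - a > L) with hp
  by_cases ht0 : t ≤ 0
  · refine iff_of_true ?_ (Or.inl ht0)
    have h0 : (0 : Int) ≤ ((List.dropWhile p l ++ [x]).length : Int) := by positivity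
    omega
  · have ht1 : 1 ≤ t := by omega
    by_cases hbig : t ≤ (l.length : Int) + 1
    · have h0 : (0 : Int) ≤ ((l ++ [x]).length : Int) - t := by
        simp only [List.length_append, List.length_singleton]; push_cast; omega
      have h1 : ((l ++ [x]).length : Int) - t < ((l ++ [x]).length : Int) := by omega
      have hgd : PySem.List.pyGetD (l ++ [x]) (((l ++ [x]).length : Int) - t) 0
          = (l ++ [x]).getD (l.length + 1 - t.toNat) 0 := by
        rw [PySem.List.pyGetD_eq_getElem (l ++ [x]) 0 h0 h1]
        rw [List.getD_eq_getElem _ _ (show l.length + 1 - t.toNat < (l ++ [x]).length by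
          simp only [List.length_append, List.length_singleton]; omega)]
        congr 1
        simp only [List.length_append, List.length_singleton]; push_cast; omega
      rw [hgd]
      by_cases ht2 : t = 1
      · subst ht2
        refine iff_of_true ?_ (Or.inr ⟨?_, ?_⟩)
        · have h2 : (0 : Nat) ≤ (List.dropWhile p l).length := Nat.zero_le _
          simp only [List.length_append, List.length_singleton]; push_cast; omega
        · simp only [List.length_append, List.length_singleton]; push_cast; omega
        · rw [show l.length + 1 - (1 : Int).toNat = l.length from by simp]
          have hx : (l ++ [x]).getD l.length 0 = x := by simp
          rw [hx]; omega
      · have ht2' : 2 ≤ t := by omega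
        have hs1 : 1 ≤ t.toNat - 1 := by omega
        have hs : t.toNat - 1 ≤ l.length := by omega
        have hmain := dropWhile_len_ge (p := p)
          (fun a b hab hb => by simp only [hp, decide_eq_true_eq] at hb ⊢; omega)
          l (hsort.imp (fun h => le_of_lt h)) (t.toNat - 1) hs1 hs
        have hgd2 : (l ++ [x]).getD (l.length + 1 - t.toNat) 0
            = l.getD (l.length - (t.toNat - 1)) 0 := by
          rw [List.getD_append l [x] 0 _ (by omega)]
          congr 1; omega
        rw [hgd2]
        constructor
        · intro h
          have hlen2 : t.toNat - 1 ≤ (List.dropWhile p l).length := by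
            simp only [List.length_append, List.length_singleton] at h; omega
          have hfalse := hmain.mp hlen2
          simp only [hp, decide_eq_false_iff_not] at hfalse
          refine Or.inr ⟨?_, by omega⟩
          simp only [List.length_append, List.length_singleton]; push_cast; omega
        · rintro (h | ⟨-, h⟩)
          · omega
          · have hfls : p (l.getD (l.length - (t.toNat - 1)) 0) = false := by
              simp only [hp, decide_eq_false_iff_not]; omega
            have hlen3 := hmain.mpr hfls
            simp only [List.length_append, List.length_singleton]; push_cast; omega
    · refine iff_of_false ?_ ?_
      · have h1 := List.length_dropWhile_le p l
        simp only [List.length_append, List.length_singleton]; push_cast; omega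
      · rintro (h | ⟨h1, -⟩)
        · omega
        · simp only [List.length_append, List.length_singleton] at h1; push_cast at h1; omega

-- the coupling invariant between A's state and B's state before processing index b
def PVInv (k L b : Int) (stA : PySem.Dict String (List Int) × List String)
    (stB : PySem.Dict String (List Int) × PySem.Set String × List String) : Prop :=
  stA.2 = stB.2.2 ∧
  (∀ q : String, q ∈ stB.2.1 ↔ q ∈ stB.2.2) ∧
  (∀ q : String, stA.1.get? q = (stB.1.get? q).map (popA k L)) ∧
  (∀ q l, stB.1.get? q = some l → l ≠ [] ∧ l.Pairwise (· < ·) ∧ ∀ a ∈ l, a < b)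

theorem step_Inv (genome : String) (k L t b : Int) (hkL : k ≤ L)
    (stA : PySem.Dict String (List Int) × List String)
    (stB : PySem.Dict String (List Int) × PySem.Set String × List String)
    (h : PVInv k L b stA stB) :
    PVInv k L (b + 1) (stepA genome k L t stA b) (stepB genome k L t stB b) := by
  obtain ⟨hc, hseen, hdict, hB⟩ := h
  set p := PySem.Str.slice genome (some b) (some (b + k)) with hpdef
  set oldB := stB.1.getD p [] with holdB
  have holdprops : oldB.Pairwise (· < ·) ∧ ∀ a ∈ oldB, a < b := by
    rw [holdB, pv_getD_eq]
    cases hg : stB.1.get? p with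
    | none => simp
    | some l => simpa using (hB p l hg).2
  have hAgetD : stA.1.getD p [] = popA k L oldB := by
    rw [pv_getD_eq, holdB, pv_getD_eq, hdict p]
    cases stB.1.get? p with
    | none => simp [popA]
    | some l => simp
  set ps := oldB ++ [b] with hps
  have hlst : popA k L (stA.1.getD p [] ++ [b]) = popA k L ps := by
    rw [hAgetD, popA_popA k L b hkL oldB (fun a ha => le_of_lt (holdprops.2 a ha))]
  have hcond : ((t ≤ ((popA k L ps).length : Int)) ↔
      (t ≤ 0 ∨ ((t ≤ ((ps).length : Int)) ∧
        PySem.List.pyGetD ps (((ps).length : Int) - t) 0 + L ≥ b + k))) :=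
    cond_iff k L t b hkL oldB holdprops.1 holdprops.2
  have hmemiff : (PySem.Set.contains stB.2.1 p = false) ↔ ¬ p ∈ stA.2 := by
    rw [PySem.Set.contains_eq_decide, hc]
    simp [hseen p]
  have hpair_ps : ps.Pairwise (· < ·) := by
    rw [hps, List.pairwise_append]
    exact ⟨holdprops.1, List.pairwise_singleton _ _,
      fun a ha y hy => by simp at hy; subst hy; exact holdprops.2 a ha⟩
  have hdict' : ∀ q : String,
      ((stA.1.insert p (popA k L ps)).get? q) =
        ((stB.1.insert p ps).get? q).map (popA k L) := by
    intro q
    rw [PySem.Dict.get?_insert, PySem.Dict.get?_insert]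
    by_cases hqp : q = p
    · simp [hqp]
    · simp only [if_neg hqp]; exact hdict q
  have hB' : ∀ (q : String) (l : List Int), (stB.1.insert p ps).get? q = some l →
      l ≠ [] ∧ l.Pairwise (· < ·) ∧ ∀ a ∈ l, a < b + 1 := by
    intro q l hg
    rw [PySem.Dict.get?_insert] at hg
    by_cases hqp : q = p
    · rw [if_pos hqp] at hg
      have hl := Option.some_inj.mp hg
      subst hl
      refine ⟨by simp [hps], hpair_ps, ?_⟩
      intro a ha; rw [hps] at ha; simp only [List.mem_append, List.mem_singleton] at ha
      rcases ha with ha | ha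
      · have := holdprops.2 a ha; omega
      · omega
    · rw [if_neg hqp] at hg
      obtain ⟨h1, h2, h3⟩ := hB q l hg
      exact ⟨h1, h2, fun a ha => by have := h3 a ha; omega⟩
  simp only [stepA, stepB, ← hpdef, ← holdB, ← hps, hlst]
  by_cases hq : t ≤ ((popA k L ps).length : Int)
  · by_cases hm : p ∈ stA.2
    · -- qualifies but already recorded: both unchanged
      rw [if_pos (show ((popA k L ps).length : Int) ≥ t from hq), if_pos hm,
        if_neg (by rw [hcond] at hq; rw [hmemiff]; tauto)]
      exact ⟨hc, hseen, hdict', hB'⟩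
    · -- qualifies and new: both append p
      rw [if_pos (show ((popA k L ps).length : Int) ≥ t from hq), if_neg hm,
        if_pos (by rw [hcond] at hq; rw [hmemiff]; exact ⟨hq, hm⟩)]
      refine ⟨by simp [hc], ?_, hdict', hB'⟩
      intro q
      rw [PySem.Set.mem_add]
      simp [hseen q]
  · -- does not qualify: both unchanged
    rw [if_neg (show ¬ ((popA k L ps).length : Int) ≥ t from hq),
      if_neg (by rw [hcond] at hq; tauto)]
    exact ⟨hc, hseen, hdict', hB'⟩

theorem fold_eq (genome : String) (k L t : Int) (hkL : k ≤ L) :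
    ∀ (N : Nat) (a bnd : Int), (bnd - a).toNat = N →
    ∀ stA stB, PVInv k L a stA stB →
    ((PySem.List.pyRange a bnd 1).foldl (stepA genome k L t) stA).2 =
      ((PySem.List.pyRange a bnd 1).foldl (stepB genome k L t) stB).2.2
  | 0, a, bnd, hN, stA, stB, h => by
      rw [PySem.List.pyRange_one_eq_nil (by omega)]
      exact h.1
  | N + 1, a, bnd, hN, stA, stB, h => by
      rw [PySem.List.pyRange_one_cons (by omega)]
      simp only [List.foldl_cons]
      exact fold_eq genome k L t hkL N (a + 1) bnd (by omega) _ _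
        (step_Inv genome k L t a hkL stA stB h)

theorem Inv_init (k L : Int) :
    PVInv k L 0 (PySem.Dict.empty, ([] : List String))
      (PySem.Dict.empty, PySem.Set.empty, ([] : List String)) := by
  refine ⟨rfl, ?_, ?_, ?_⟩
  · intro q; simp [PySem.Set.empty]
  · intro q; simp [PySem.Dict.get?_empty]
  · intro q l hg; simp [PySem.Dict.get?_empty] at hg

-- ===== VERDICT (by name: the statement is the Claim_ definition above) =====
theorem get_clumps_spec : Claim_equal_get_clumps := by
  intro genome k L t _ hpre
  unfold Spec_get_clumps get_clumps get_clumps_alt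
  rcases hpre with hkL | hlen
  · exact fold_eq genome k L t hkL (PySem.Str.len genome - k + 1 - 0).toNat 0
      (PySem.Str.len genome - k + 1) rfl _ _ (Inv_init k L)
  · rw [PySem.List.pyRange_one_eq_nil (by omega)]
    rfl
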